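-- pv_equiv track=rewrite | github.com/Jrohy/multi-v2ray | v2ray_util/pykit/strutil/strutil.py | line_pad
-- ===== SOURCE A (Python) =====
-- def line_pad(linestr, padding=''):
--
--     lines = linestr.split("\n")
--
--     if type(padding) == str:
--         lines = [padding + x for x in lines]
--
--     elif callable(padding):
--         lines = [padding(x) + x for x in lines]
--
--     lines = "\n".join(lines)
--
--     return lines
-- ===== SOURCE B (Python) =====
-- def line_pad(linestr, padding=''):
--     if type(padding) == str:
--         return padding + linestr.replace("\n", "\n" + padding)
--     if callable(padding):
--         out = []
--         for x in linestr.split("\n"):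
--             out.append(padding(x) + x)
--         return "\n".join(out)
--     return linestr
-- ===== Notes on version B (the rewrite author's own statement) =====
-- stated objective: idiomatic
-- what changed: The string-padding branch no longer splits into lines, maps a concatenation over them and re-joins: it prepends the padding once and replaces every newline character by a newline followed by the padding in a single substitution; the callable branch keeps per-line iteration, and a padding that is neither a str nor callable returns linestr directly.
import Mathlib
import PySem

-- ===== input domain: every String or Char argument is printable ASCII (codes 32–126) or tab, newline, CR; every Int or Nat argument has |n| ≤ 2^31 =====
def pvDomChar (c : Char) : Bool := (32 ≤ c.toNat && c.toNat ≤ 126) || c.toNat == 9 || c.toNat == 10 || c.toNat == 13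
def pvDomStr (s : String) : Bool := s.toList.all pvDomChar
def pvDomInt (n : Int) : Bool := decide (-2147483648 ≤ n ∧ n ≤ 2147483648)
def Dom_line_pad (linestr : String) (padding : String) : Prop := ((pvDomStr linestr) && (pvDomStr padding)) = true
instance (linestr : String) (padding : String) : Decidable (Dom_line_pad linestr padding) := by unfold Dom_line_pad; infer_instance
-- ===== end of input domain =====

-- B replaces A's split → map-concatenate → join pipeline by a single string substitution
-- padding + linestr.replace("\n", "\n" + padding) (objective: idiomatic; same asymptotic cost).
-- Under the type convention padding : String, so only A's `type(padding) == str` branch is reachable.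

-- ===== PORT A =====
def line_pad (linestr : String) (padding : String) : String :=
  -- lines = linestr.split("\n")  (sep "\n" is nonempty, so split = Chars.splitOn)
  let lines : List String := (PySem.Chars.splitOn linestr.toList "\n".toList).map String.ofList
  -- padding is a str, so: lines = [padding + x for x in lines]
  let lines : List String := lines.map (fun x => padding ++ x)
  -- lines = "\n".join(lines)
  PySem.Str.join "\n" lines

-- ===== PORT B =====
def line_pad_alt (linestr : String) (padding : String) : String :=
  -- padding is a str: return padding + linestr.replace("\n", "\n" + padding)
  padding ++ PySem.Str.replace linestr "\n" ("\n" ++ padding)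

-- ===== PRECONDITION & SPEC =====
def Spec_line_pad (linestr : String) (padding : String) (out : String) : Prop := out = line_pad_alt linestr padding
instance (linestr : String) (padding : String) (out : String) : Decidable (Spec_line_pad linestr padding out) := by unfold Spec_line_pad; infer_instance

-- ===== CLAIM (what is proved, stated in full; the proofs are below) =====
def Claim_equal_line_pad : Prop := ∀ (linestr : String) (padding : String), Dom_line_pad linestr padding → Spec_line_pad linestr padding (line_pad linestr padding)

-- ===== LEMMAS AND PROOFS =====

-- Simple fuel-free models of single-character-separator split and replace.
def pvSplit1 (c : Char) : List Char → List (List Char)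
  | [] => [[]]
  | x :: t => if x = c then [] :: pvSplit1 c t else (pvSplit1 c t).modifyHead (x :: ·)

def pvRepl1 (c : Char) (new : List Char) : List Char → List Char
  | [] => []
  | x :: t => if x = c then new ++ pvRepl1 c new t else x :: pvRepl1 c new t

theorem pvSplit1_ne_nil (c : Char) (l : List Char) : pvSplit1 c l ≠ [] := by
  cases l with
  | nil => simp [pvSplit1]
  | cons x t =>
    simp only [pvSplit1]
    split_ifs
    · simp
    · cases h : pvSplit1 c t with
      | nil => exact absurd h (pvSplit1_ne_nil c t)
      | cons a as => simp

theorem splitOn_go_eq (c : Char) :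
    ∀ (fuel : Nat) (l cur : List Char) (acc : List (List Char)), l.length ≤ fuel →
      PySem.Chars.splitOn.go [c] fuel l cur acc
        = acc.reverse ++ (pvSplit1 c l).modifyHead (cur.reverse ++ ·) := by
  intro fuel
  induction fuel with
  | zero =>
    intro l cur acc h
    have : l = [] := List.length_eq_zero_iff.mp (Nat.le_zero.mp h)
    subst this
    simp [PySem.Chars.splitOn.go, pvSplit1]
  | succ n ih =>
    intro l cur acc h
    cases l with
    | nil => simp [PySem.Chars.splitOn.go, pvSplit1]
    | cons x t =>
      by_cases hx : x = c
      · subst hx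
        have hpre : [x].isPrefixOf (x :: t) = true := by simp [List.isPrefixOf]
        rw [show PySem.Chars.splitOn.go [x] (n+1) (x :: t) cur acc
              = PySem.Chars.splitOn.go [x] n t [] (cur.reverse :: acc) by
            simp [PySem.Chars.splitOn.go, hpre]]
        rw [ih t [] (cur.reverse :: acc) (by simpa using Nat.le_of_succ_le_succ h)]
        simp [pvSplit1]
        cases ht : pvSplit1 x t with
        | nil => exact absurd ht (pvSplit1_ne_nil x t)
        | cons a as => simp
      · have hpre : [c].isPrefixOf (x :: t) = false := by
          simp [List.isPrefixOf]
          intro hcx; exact hx hcx.symm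
        rw [show PySem.Chars.splitOn.go [c] (n+1) (x :: t) cur acc
              = PySem.Chars.splitOn.go [c] n t (x :: cur) acc by
            simp [PySem.Chars.splitOn.go, hpre]]
        rw [ih t (x :: cur) acc (by simpa using Nat.le_of_succ_le_succ h)]
        simp only [pvSplit1, if_neg hx]
        cases ht : pvSplit1 c t with
        | nil => exact absurd ht (pvSplit1_ne_nil c t)
        | cons a as => simp

theorem splitOn_eq (c : Char) (l : List Char) :
    PySem.Chars.splitOn l [c] = pvSplit1 c l := by
  rw [PySem.Chars.splitOn, splitOn_go_eq c (l.length + 1) l [] [] (Nat.le_succ _)]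
  cases h : pvSplit1 c l with
  | nil => exact absurd h (pvSplit1_ne_nil c l)
  | cons a as => simp

theorem replace_go_eq (c : Char) (new : List Char) :
    ∀ (fuel : Nat) (l acc : List Char), l.length ≤ fuel →
      PySem.Chars.replace.go [c] new fuel l acc = acc.reverse ++ pvRepl1 c new l := by
  intro fuel
  induction fuel with
  | zero =>
    intro l acc h
    have : l = [] := List.length_eq_zero_iff.mp (Nat.le_zero.mp h)
    subst this
    simp [PySem.Chars.replace.go, pvRepl1]
  | succ n ih =>
    intro l acc h
    cases l with
    | nil => simp [PySem.Chars.replace.go, pvRepl1]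
    | cons x t =>
      by_cases hx : x = c
      · subst hx
        have hpre : [x].isPrefixOf (x :: t) = true := by simp [List.isPrefixOf]
        rw [show PySem.Chars.replace.go [x] new (n+1) (x :: t) acc
              = PySem.Chars.replace.go [x] new n t (new.reverse ++ acc) by
            simp [PySem.Chars.replace.go, hpre]]
        rw [ih t (new.reverse ++ acc) (by simpa using Nat.le_of_succ_le_succ h)]
        simp [pvRepl1]
      · have hpre : [c].isPrefixOf (x :: t) = false := by
          simp [List.isPrefixOf]
          intro hcx; exact hx hcx.symm
        rw [show PySem.Chars.replace.go [c] new (n+1) (x :: t) acc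
              = PySem.Chars.replace.go [c] new n t (x :: acc) by
            simp [PySem.Chars.replace.go, hpre]]
        rw [ih t (x :: acc) (by simpa using Nat.le_of_succ_le_succ h)]
        simp [pvRepl1, hx]

theorem replace_eq (c : Char) (new l : List Char) :
    PySem.Chars.replace l [c] new = pvRepl1 c new l := by
  rw [PySem.Chars.replace]
  simp only [List.isEmpty_cons]
  exact replace_go_eq c new l.length l [] (Nat.le_refl _)

theorem intercalate_cons₂ {α : Type} (sep a b : List α) (bs : List (List α)) :
    sep.intercalate (a :: b :: bs) = a ++ sep ++ sep.intercalate (b :: bs) := by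
  simp [List.intercalate, List.flatten]

-- the key identity: join with prefix-map over split = prefix + substitution
theorem join_map_split (c : Char) (p : List Char) :
    ∀ (l q : List Char),
      PySem.Chars.join [c] ((pvSplit1 c l).modifyHead (q ++ ·) |>.map (p ++ ·))
        = p ++ q ++ pvRepl1 c (c :: p) l := by
  intro l
  induction l with
  | nil => intro q; simp [pvSplit1, pvRepl1, PySem.Chars.join, List.intercalate]
  | cons x t ih =>
    intro q
    by_cases hx : x = c
    · subst hx
      rw [show pvSplit1 x (x :: t) = [] :: pvSplit1 x t from by simp [pvSplit1]]
      cases ht : pvSplit1 x t with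
      | nil => exact absurd ht (pvSplit1_ne_nil x t)
      | cons a as =>
        have hIH := ih []
        rw [ht] at hIH
        simp only [List.modifyHead, List.nil_append, List.map_cons, PySem.Chars.join] at hIH ⊢
        rw [intercalate_cons₂, hIH]
        simp [pvRepl1]
    · have h1 := ih (q ++ [x])
      rw [show pvSplit1 c (x :: t) = (pvSplit1 c t).modifyHead (x :: ·) from by
        simp [pvSplit1, hx]]
      cases ht : pvSplit1 c t with
      | nil => exact absurd ht (pvSplit1_ne_nil c t)
      | cons a as =>
        rw [ht] at h1
        simp only [List.modifyHead] at h1 ⊢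
        rw [show q ++ x :: a = (q ++ [x]) ++ a from by simp, h1]
        simp [pvRepl1, hx]

theorem join_map_split' (c : Char) (p l : List Char) :
    PySem.Chars.join [c] ((pvSplit1 c l).map (p ++ ·)) = p ++ pvRepl1 c (c :: p) l := by
  have h := join_map_split c p l []
  cases ht : pvSplit1 c l with
  | nil => exact absurd ht (pvSplit1_ne_nil c l)
  | cons a as =>
    rw [ht] at h
    simp only [List.modifyHead, List.nil_append] at h
    simpa [ht] using h

-- ===== VERDICT (by name: the statement is the Claim_ definition above) =====
theorem line_pad_spec : Claim_equal_line_pad := by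
  intro linestr padding _
  unfold Spec_line_pad line_pad line_pad_alt
  apply String.toList_inj.mp
  have hn : ("\n" : String).toList = ['\n'] := by decide
  simp only [PySem.Str.toList_join, String.toList_append, PySem.Str.toList_replace, hn,
    List.map_map, Function.comp_def, String.toList_ofList]
  rw [splitOn_eq, replace_eq]
  exact join_map_split' '\n' padding.toList linestr.toList
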